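-- pv_equiv track=rewrite | github.com/manubot/manubot-ai-editor | libs/manubot/ai_editor/editor.py | prepare_paragraph
-- ===== SOURCE A (Python) =====
-- def prepare_paragraph(paragraph: list[str]) -> str:
--     """
--     It takes a list of sentences that are part of a paragraph and joins them
--     into a single string. The paragraph might have Equations, which are
--     between "$$" and have an identifier between curly brackets. There are
--     two kinds of paragraphs:
--     1) "Simple paragraphs" are a set of sentences with no Equations;
--     2) "Equation paragraphs" are a set of sentences where at least one
--     sentence has an Equation. When joining sentences with Equations, a
--     newline is added before and after the Equation.
--     """
--     paragraph_text = ""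
--
--     paragraph = iter(paragraph)
--     for sentence in paragraph:
--         sentence = sentence.strip()
--
--         if sentence == "":
--             paragraph_text += "\n"
--         elif sentence.startswith("$$"):
--             # this is an equation
--             equation_sentences = [sentence]
--
--             sentence = next(paragraph, None)
--             while sentence is not None and not sentence.startswith("$$"):
--                 equation_sentences.append(sentence)
--                 sentence = next(paragraph, None)
--
--             if sentence is not None:
--                 equation_sentences.append(sentence)
--
--             paragraph_text += "\n".join(equation_sentences) + "\n"
--         else:
--             simple_sentences = [sentence]
--
--             sentence = next(paragraph, None)
--             while sentence is not None and sentence != "":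
--                 simple_sentences.append(sentence)
--                 sentence = next(paragraph, None)
--
--             suffix = "\n"
--             if sentence == "":
--                 suffix += "\n"
--
--             paragraph_text += " ".join(simple_sentences) + suffix
--
--     return paragraph_text
-- ===== SOURCE B (Python) =====
-- def prepare_paragraph(paragraph: list[str]) -> str:
--     out = []
--     mode = 0  # 0 = neutral, 1 = inside equation group, 2 = inside simple group
--     group = []
--     for s in paragraph:
--         if mode == 1:
--             group.append(s)
--             if s.startswith("$$"):
--                 out.append("\n".join(group) + "\n")
--                 group, mode = [], 0
--         elif mode == 2:
--             if s == "":
--                 out.append(" ".join(group) + "\n\n")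
--                 group, mode = [], 0
--             else:
--                 group.append(s)
--         else:
--             t = s.strip()
--             if t == "":
--                 out.append("\n")
--             elif t.startswith("$$"):
--                 group, mode = [t], 1
--             else:
--                 group, mode = [t], 2
--     if mode == 1:
--         out.append("\n".join(group) + "\n")
--     elif mode == 2:
--         out.append(" ".join(group) + "\n")
--     return "".join(out)
-- ===== Notes on version B (the rewrite author's own statement) =====
-- stated objective: alternative
-- what changed: Replaced A's nested iterator loops (an outer for that advances a shared iterator inside two inner while-loops collecting a group) by a flat single for-loop state machine: one mode variable (neutral/equation/simple), a current-group list, and a flush at end of input; no inner loops and no explicit iterator manipulation.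
import Mathlib
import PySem

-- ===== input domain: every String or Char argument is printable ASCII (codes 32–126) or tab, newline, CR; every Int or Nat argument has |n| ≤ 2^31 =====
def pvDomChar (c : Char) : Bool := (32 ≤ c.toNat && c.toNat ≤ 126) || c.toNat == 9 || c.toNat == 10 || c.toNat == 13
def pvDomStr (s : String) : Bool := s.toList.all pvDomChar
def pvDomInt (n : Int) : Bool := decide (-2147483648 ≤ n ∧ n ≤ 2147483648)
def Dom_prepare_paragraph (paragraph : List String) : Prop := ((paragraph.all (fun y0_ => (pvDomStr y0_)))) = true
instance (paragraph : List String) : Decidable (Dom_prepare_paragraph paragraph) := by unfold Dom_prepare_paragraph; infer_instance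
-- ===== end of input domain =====

-- B replaces A's nested iterator loops by a flat one-pass state machine (mode, current
-- group, emitted chunks) with a final flush; same return value, no speed claim.

-- ===== PORT A =====
-- A's inner `while` advancing the shared iterator for an equation group:
-- collects into `equation_sentences` (acc) and returns the remaining iterator.
def pvA_eqLoop : List String → List String → List String × List String
  | [], acc => (acc, [])
  | s :: rest, acc =>
    if PySem.Str.startswith s "$$" then (acc ++ [s], rest)
    else pvA_eqLoop rest (acc ++ [s])

-- A's inner `while` for a simple group; the Bool records whether it stopped on "" (vs EOF).
def pvA_simpleLoop : List String → List String → List String × List String × Bool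
  | [], acc => (acc, [], false)
  | s :: rest, acc =>
    if s == "" then (acc, rest, true)
    else pvA_simpleLoop rest (acc ++ [s])

theorem pvA_eqLoop_len : ∀ (xs acc : List String), (pvA_eqLoop xs acc).2.length ≤ xs.length := by
  intro xs
  induction xs with
  | nil => intro acc; simp [pvA_eqLoop]
  | cons s rest ih =>
    intro acc
    simp only [pvA_eqLoop]
    split
    · simp
    · exact Nat.le_succ_of_le (ih _)

theorem pvA_simpleLoop_len : ∀ (xs acc : List String), (pvA_simpleLoop xs acc).2.1.length ≤ xs.length := by
  intro xs
  induction xs with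
  | nil => intro acc; simp [pvA_simpleLoop]
  | cons s rest ih =>
    intro acc
    simp only [pvA_simpleLoop]
    split
    · simp
    · exact Nat.le_succ_of_le (ih _)

-- A's outer `for sentence in paragraph` with the accumulated `paragraph_text`.
def pvA_loop (xs : List String) (acc : String) : String :=
  match xs with
  | [] => acc
  | s :: rest =>
    let s' := PySem.Str.strip s
    if s' == "" then pvA_loop rest (acc ++ "\n")
    else if PySem.Str.startswith s' "$$" then
      let p := pvA_eqLoop rest [s']
      pvA_loop p.2 (acc ++ PySem.Str.join "\n" p.1 ++ "\n")
    else
      let p := pvA_simpleLoop rest [s']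
      pvA_loop p.2.1 (acc ++ PySem.Str.join " " p.1 ++ (if p.2.2 then "\n\n" else "\n"))
termination_by xs.length
decreasing_by
  · simp
  · exact Nat.lt_succ_of_le (pvA_eqLoop_len rest [PySem.Str.strip s])
  · exact Nat.lt_succ_of_le (pvA_simpleLoop_len rest [PySem.Str.strip s])

def prepare_paragraph (paragraph : List String) : String :=
  pvA_loop paragraph ""

-- ===== PORT B =====
-- B's mode variable: 0 = neutral, 1 = inside equation group, 2 = inside simple group.
inductive PvMode : Type
  | neutral
  | ineq
  | insimple
deriving DecidableEq, Repr

-- B's loop body: one step of the state machine on state (mode, group, out).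
def pvB_step : PvMode × List String × List String → String → PvMode × List String × List String
  | (PvMode.ineq, group, out), s =>
    let group := group ++ [s]
    if PySem.Str.startswith s "$$" then
      (PvMode.neutral, [], out ++ [PySem.Str.join "\n" group ++ "\n"])
    else (PvMode.ineq, group, out)
  | (PvMode.insimple, group, out), s =>
    if s == "" then (PvMode.neutral, [], out ++ [PySem.Str.join " " group ++ "\n\n"])
    else (PvMode.insimple, group ++ [s], out)
  | (PvMode.neutral, group, out), s =>
    let t := PySem.Str.strip s
    if t == "" then (PvMode.neutral, group, out ++ ["\n"])
    else if PySem.Str.startswith t "$$" then (PvMode.ineq, [t], out)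
    else (PvMode.insimple, [t], out)

-- B's final flush of a pending group after the loop.
def pvB_flush : PvMode × List String × List String → List String
  | (PvMode.ineq, group, out) => out ++ [PySem.Str.join "\n" group ++ "\n"]
  | (PvMode.insimple, group, out) => out ++ [PySem.Str.join " " group ++ "\n"]
  | (PvMode.neutral, _, out) => out

def prepare_paragraph_alt (paragraph : List String) : String :=
  PySem.Str.join "" (pvB_flush (paragraph.foldl pvB_step (PvMode.neutral, [], [])))

-- ===== PRECONDITION & SPEC =====
def Spec_prepare_paragraph (paragraph : List String) (out : String) : Prop := out = prepare_paragraph_alt paragraph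
instance (paragraph : List String) (out : String) : Decidable (Spec_prepare_paragraph paragraph out) := by unfold Spec_prepare_paragraph; infer_instance

-- ===== CLAIM (what is proved, stated in full; the proofs are below) =====
def Claim_equal_prepare_paragraph : Prop := ∀ (paragraph : List String), Dom_prepare_paragraph paragraph → Spec_prepare_paragraph paragraph (prepare_paragraph paragraph)

-- ===== LEMMAS AND PROOFS =====

-- proof-only helpers: split off the next group (body, rest, found)
def pvTakeEq : List String → List String × List String × Bool
  | [] => ([], [], false)
  | s :: rest =>
    if PySem.Str.startswith s "$$" then ([s], rest, true)
    else
      let p := pvTakeEq rest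
      (s :: p.1, p.2.1, p.2.2)

def pvTakeSimple : List String → List String × List String × Bool
  | [] => ([], [], false)
  | s :: rest =>
    if s == "" then ([], rest, true)
    else
      let p := pvTakeSimple rest
      (s :: p.1, p.2.1, p.2.2)

theorem pvTakeEq_len : ∀ (xs : List String), (pvTakeEq xs).2.1.length ≤ xs.length := by
  intro xs
  induction xs with
  | nil => simp [pvTakeEq]
  | cons s rest ih =>
    simp only [pvTakeEq]
    split
    · simp
    · exact Nat.le_succ_of_le ih

theorem pvTakeSimple_len : ∀ (xs : List String), (pvTakeSimple xs).2.1.length ≤ xs.length := by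
  intro xs
  induction xs with
  | nil => simp [pvTakeSimple]
  | cons s rest ih =>
    simp only [pvTakeSimple]
    split
    · simp
    · exact Nat.le_succ_of_le ih

-- common recursive reference form both ports are reduced to
def pvSpec : List String → String
  | [] => ""
  | s :: rest =>
    let t := PySem.Str.strip s
    if t == "" then "\n" ++ pvSpec rest
    else if PySem.Str.startswith t "$$" then
      let p := pvTakeEq rest
      PySem.Str.join "\n" (t :: p.1) ++ "\n" ++ pvSpec p.2.1
    else
      let p := pvTakeSimple rest
      PySem.Str.join " " (t :: p.1) ++ (if p.2.2 then "\n\n" else "\n") ++ pvSpec p.2.1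
termination_by xs => xs.length
decreasing_by
  · simp
  · exact Nat.lt_succ_of_le (pvTakeEq_len rest)
  · exact Nat.lt_succ_of_le (pvTakeSimple_len rest)

-- ===== A side: pvA_loop equals pvSpec =====
theorem pvA_eqLoop_eq : ∀ (xs acc : List String),
    pvA_eqLoop xs acc = (acc ++ (pvTakeEq xs).1, (pvTakeEq xs).2.1) := by
  intro xs
  induction xs with
  | nil => intro acc; simp [pvA_eqLoop, pvTakeEq]
  | cons s rest ih =>
    intro acc
    simp only [pvA_eqLoop, pvTakeEq]
    split
    · simp
    · simp [ih]

theorem pvA_simpleLoop_eq : ∀ (xs acc : List String),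
    pvA_simpleLoop xs acc = (acc ++ (pvTakeSimple xs).1, (pvTakeSimple xs).2.1, (pvTakeSimple xs).2.2) := by
  intro xs
  induction xs with
  | nil => intro acc; simp [pvA_simpleLoop, pvTakeSimple]
  | cons s rest ih =>
    intro acc
    simp only [pvA_simpleLoop, pvTakeSimple]
    split
    · simp
    · simp [ih]

theorem pvA_loop_eq : ∀ (n : Nat) (xs : List String), xs.length ≤ n →
    ∀ (acc : String), pvA_loop xs acc = acc ++ pvSpec xs := by
  intro n
  induction n with
  | zero =>
    intro xs h acc
    have : xs = [] := List.eq_nil_of_length_eq_zero (Nat.le_zero.mp h)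
    subst this
    simp [pvA_loop, pvSpec]
  | succ n ih =>
    intro xs h acc
    match xs with
    | [] => simp [pvA_loop, pvSpec]
    | s :: rest =>
      have hr : rest.length ≤ n := Nat.lt_succ_iff.mp h
      rw [pvA_loop, pvSpec]
      simp only [pvA_eqLoop_eq, pvA_simpleLoop_eq, List.singleton_append]
      split
      · rw [ih rest hr, ← String.append_assoc]
      · split
        · rw [ih _ (le_trans (pvTakeEq_len rest) hr)]
          simp [String.append_assoc]
        · rw [ih _ (le_trans (pvTakeSimple_len rest) hr)]
          simp [String.append_assoc]

-- ===== B side: state machine equals pvSpec =====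
theorem pvCharsJoin_nil_append (a : List (List Char)) (x : List Char) :
    PySem.Chars.join [] (a ++ [x]) = PySem.Chars.join [] a ++ x := by
  induction a with
  | nil => simp [PySem.Chars.join_nil, PySem.Chars.join_singleton]
  | cons y ys ih =>
    cases ys with
    | nil => simp [PySem.Chars.join_singleton, PySem.Chars.join_cons_cons]
    | cons z zs => simp_all [PySem.Chars.join_cons_cons]

theorem pvJoin_append (a : List String) (x : String) :
    PySem.Str.join "" (a ++ [x]) = PySem.Str.join "" a ++ x := by
  simp [PySem.Str.join, pvCharsJoin_nil_append]

-- running from equation mode consumes exactly pvTakeEq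
theorem pvB_run_ineq : ∀ (xs g out : List String),
    List.foldl pvB_step (PvMode.ineq, g, out) xs =
      if (pvTakeEq xs).2.2 then
        List.foldl pvB_step
          (PvMode.neutral, [], out ++ [PySem.Str.join "\n" (g ++ (pvTakeEq xs).1) ++ "\n"])
          (pvTakeEq xs).2.1
      else (PvMode.ineq, g ++ xs, out) := by
  intro xs
  induction xs with
  | nil => intro g out; simp [pvTakeEq]
  | cons s rest ih =>
    intro g out
    simp only [List.foldl_cons, pvTakeEq, pvB_step]
    split
    · simp_all
    · rename_i hsw
      simp only []
      rw [ih (g ++ [s]) out]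
      by_cases hf : (pvTakeEq rest).2.2 = true
      · simp [hf, List.append_assoc]
      · simp [hf, List.append_assoc]

-- running from simple mode consumes exactly pvTakeSimple
theorem pvB_run_insimple : ∀ (xs g out : List String),
    List.foldl pvB_step (PvMode.insimple, g, out) xs =
      if (pvTakeSimple xs).2.2 then
        List.foldl pvB_step
          (PvMode.neutral, [], out ++ [PySem.Str.join " " (g ++ (pvTakeSimple xs).1) ++ "\n\n"])
          (pvTakeSimple xs).2.1
      else (PvMode.insimple, g ++ xs, out) := by
  intro xs
  induction xs with
  | nil => intro g out; simp [pvTakeSimple]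
  | cons s rest ih =>
    intro g out
    simp only [List.foldl_cons, pvTakeSimple, pvB_step]
    split
    · simp_all
    · rename_i hsw
      simp only []
      rw [ih (g ++ [s]) out]
      by_cases hf : (pvTakeSimple rest).2.2 = true
      · simp [hf, List.append_assoc]
      · simp [hf, List.append_assoc]

theorem pvB_run_neutral : ∀ (n : Nat) (xs : List String), xs.length ≤ n →
    ∀ (g out : List String),
      PySem.Str.join "" (pvB_flush (List.foldl pvB_step (PvMode.neutral, g, out) xs)) =
        PySem.Str.join "" out ++ pvSpec xs := by
  intro n
  induction n with
  | zero =>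
    intro xs h g out
    have : xs = [] := List.eq_nil_of_length_eq_zero (Nat.le_zero.mp h)
    subst this
    simp [pvB_flush, pvSpec]
  | succ n ih =>
    intro xs h g out
    match xs with
    | [] => simp [pvB_flush, pvSpec]
    | s :: rest =>
      have hr : rest.length ≤ n := Nat.lt_succ_iff.mp h
      rw [pvSpec]
      simp only [List.foldl_cons, pvB_step]
      split
      · -- blank sentence
        rw [ih rest hr g (out ++ ["\n"]), pvJoin_append, String.append_assoc]
      · split
        · -- equation group start
          rw [pvB_run_ineq rest [PySem.Str.strip s] out]
          by_cases hf : (pvTakeEq rest).2.2 = true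
          · rw [if_pos hf,
              ih _ (le_trans (pvTakeEq_len rest) hr) [] _, pvJoin_append]
            simp [String.append_assoc]
          · rw [if_neg hf]
            have hrest : (pvTakeEq rest).2.1 = [] ∧ (pvTakeEq rest).1 = rest := by
              clear hr h ih
              induction rest with
              | nil => simp [pvTakeEq]
              | cons a as ihr =>
                revert hf
                simp only [pvTakeEq]
                split
                · intro hc; simp at hc
                · intro hc
                  have := ihr hc
                  simp [this]
            simp only [pvB_flush, pvJoin_append]
            rw [hrest.1, hrest.2]
            simp [pvSpec]
        · -- simple group start
          rw [pvB_run_insimple rest [PySem.Str.strip s] out]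
          by_cases hf : (pvTakeSimple rest).2.2 = true
          · rw [if_pos hf,
              ih _ (le_trans (pvTakeSimple_len rest) hr) [] _, pvJoin_append]
            simp [hf, String.append_assoc]
          · rw [if_neg hf]
            have hrest : (pvTakeSimple rest).2.1 = [] ∧ (pvTakeSimple rest).1 = rest := by
              clear hr h ih
              induction rest with
              | nil => simp [pvTakeSimple]
              | cons a as ihr =>
                revert hf
                simp only [pvTakeSimple]
                split
                · intro hc; simp at hc
                · intro hc
                  have := ihr hc
                  simp [this]
            simp only [pvB_flush, pvJoin_append]
            rw [hrest.1, hrest.2]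
            simp [hf, pvSpec]

-- ===== VERDICT (by name: the statement is the Claim_ definition above) =====
theorem prepare_paragraph_spec : Claim_equal_prepare_paragraph := by
  intro paragraph _
  unfold Spec_prepare_paragraph prepare_paragraph prepare_paragraph_alt
  rw [pvA_loop_eq paragraph.length paragraph le_rfl "",
      pvB_run_neutral paragraph.length paragraph le_rfl [] []]
  simp [PySem.Str.join]
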